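-- pv_equiv track=rewrite | github.com/marketstateai/marketstate_cloned | data/src/orchestrator.py | state_from_task_states
-- ===== SOURCE A (Python) =====
-- from typing import Any, Mapping
--
-- def state_from_task_states(task_states: Mapping[str, str]) -> str:
--     values = [str(v).strip().lower() for v in task_states.values()]
--     if any(v in {"failed", "upstream_failed"} for v in values):
--         return "failed"
--     if values and all(v == "success" for v in values):
--         return "success"
--     if any(v in {"queued", "scheduled", "running", "deferred", "none"} for v in values):
--         return "running"
--     if values and all(v in {"success", "skipped"} for v in values) and any(v == "skipped" for v in values):
--         return "skipped"
--     return "unknown"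
-- ===== SOURCE B (Python) =====
-- _RANK = {"failed": 5, "upstream_failed": 5,
--          "queued": 4, "scheduled": 4, "running": 4, "deferred": 4, "none": 4,
--          "skipped": 2, "success": 1}
-- _TABLE = ["unknown", "success", "skipped", "unknown", "running", "failed"]
--
-- def state_from_task_states(task_states):
--     m = 0
--     for v in task_states.values():
--         m = max(m, _RANK.get(str(v).strip().lower(), 3))
--     return _TABLE[m]
-- ===== Notes on version B (the rewrite author's own statement) =====
-- stated objective: alternative
-- what changed: Replaces A's four staged any/all scans over the normalized value list with a single fold that maps each value to a numeric severity rank, keeps the running maximum, and decodes the result from a 6-entry table.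
import Mathlib
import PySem

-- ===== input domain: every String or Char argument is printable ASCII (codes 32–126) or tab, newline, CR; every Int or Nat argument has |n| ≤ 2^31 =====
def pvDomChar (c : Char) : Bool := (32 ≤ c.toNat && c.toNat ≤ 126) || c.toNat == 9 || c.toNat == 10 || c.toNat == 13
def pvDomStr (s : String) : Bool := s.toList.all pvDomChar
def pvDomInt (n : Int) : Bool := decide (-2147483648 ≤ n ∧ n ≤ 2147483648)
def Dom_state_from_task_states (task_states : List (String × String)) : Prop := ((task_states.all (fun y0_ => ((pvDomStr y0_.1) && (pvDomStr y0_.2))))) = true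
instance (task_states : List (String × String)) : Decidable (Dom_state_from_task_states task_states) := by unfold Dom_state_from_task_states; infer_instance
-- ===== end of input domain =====

-- B replaces A's four staged any/all scans with one max-of-ranks fold decoded through a table; objective: alternative (single pass, same cost).


-- ===== PORT A =====
def state_from_task_states (task_states : List (String × String)) : String :=
  let values := (PySem.Dict.ofList task_states).values.map
    (fun v => PySem.Str.lower (PySem.Str.strip v))
  if values.any (fun v => ["failed", "upstream_failed"].contains v) then "failed"
  else if (!values.isEmpty) && values.all (fun v => v == "success") then "success"
  else if values.any (fun v => ["queued", "scheduled", "running", "deferred", "none"].contains v) then "running"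
  else if (!values.isEmpty) && values.all (fun v => ["success", "skipped"].contains v)
          && values.any (fun v => v == "skipped") then "skipped"
  else "unknown"

-- ===== PORT B =====
def pvRANK : PySem.Dict String Int :=
  PySem.Dict.ofList [("failed", 5), ("upstream_failed", 5),
    ("queued", 4), ("scheduled", 4), ("running", 4), ("deferred", 4), ("none", 4),
    ("skipped", 2), ("success", 1)]

def pvTABLE : List String := ["unknown", "success", "skipped", "unknown", "running", "failed"]

def state_from_task_states_alt (task_states : List (String × String)) : String :=
  let m : Int := (PySem.Dict.ofList task_states).values.foldl
    (fun m v => max m (PySem.Dict.getD pvRANK (PySem.Str.lower (PySem.Str.strip v)) 3)) 0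
  -- _TABLE[m]: m is always in range 0..5, so the Python indexing never raises (proved by the equivalence below)
  (PySem.List.pyGet? pvTABLE m).getD ""

-- ===== PRECONDITION & SPEC =====
def Spec_state_from_task_states (task_states : List (String × String)) (out : String) : Prop := out = state_from_task_states_alt task_states
instance (task_states : List (String × String)) (out : String) : Decidable (Spec_state_from_task_states task_states out) := by unfold Spec_state_from_task_states; infer_instance

-- ===== CLAIM (what is proved, stated in full; the proofs are below) =====
def Claim_equal_state_from_task_states : Prop := ∀ (task_states : List (String × String)), Dom_state_from_task_states task_states → Spec_state_from_task_states task_states (state_from_task_states task_states)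

-- ===== LEMMAS AND PROOFS =====

def pvRank (u : String) : Int := PySem.Dict.getD pvRANK u 3

lemma pvRank_eq (u : String) : pvRank u =
    if u = "failed" ∨ u = "upstream_failed" then 5
    else if u = "queued" ∨ u = "scheduled" ∨ u = "running" ∨ u = "deferred" ∨ u = "none" then 4
    else if u = "skipped" then 2
    else if u = "success" then 1
    else 3 := by
  simp [pvRank, pvRANK, PySem.Dict.getD, PySem.Dict.ofList, PySem.Dict.get?, PySem.Dict.update,
    PySem.Dict.empty, PySem.Dict.insert, List.find?]
  split_ifs with h1 h2 h3 h4 <;>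
    first
      | (rcases h1 with rfl | rfl <;> rfl)
      | (rcases h2 with rfl | rfl | rfl | rfl | rfl <;> rfl)
      | (subst h3; rfl)
      | (subst h4; rfl)
      | (push Not at h1 h2;
         simp [show ("failed" == u) = false from beq_eq_false_iff_ne.mpr (Ne.symm h1.1),
               show ("upstream_failed" == u) = false from beq_eq_false_iff_ne.mpr (Ne.symm h1.2),
               show ("queued" == u) = false from beq_eq_false_iff_ne.mpr (Ne.symm h2.1),
               show ("scheduled" == u) = false from beq_eq_false_iff_ne.mpr (Ne.symm h2.2.1),
               show ("running" == u) = false from beq_eq_false_iff_ne.mpr (Ne.symm h2.2.2.1),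
               show ("deferred" == u) = false from beq_eq_false_iff_ne.mpr (Ne.symm h2.2.2.2.1),
               show ("none" == u) = false from beq_eq_false_iff_ne.mpr (Ne.symm h2.2.2.2.2),
               show ("skipped" == u) = false from beq_eq_false_iff_ne.mpr (Ne.symm h3),
               show ("success" == u) = false from beq_eq_false_iff_ne.mpr (Ne.symm h4)])

lemma pvRank_bounds (u : String) : 1 ≤ pvRank u ∧ pvRank u ≤ 5 := by
  rw [pvRank_eq]; split_ifs <;> constructor <;> norm_num

lemma pvRank_five_iff (u : String) :
    pvRank u = 5 ↔ (["failed", "upstream_failed"].contains u = true) := by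
  rw [pvRank_eq]; split_ifs with h1 h2 h3 h4
  · simp [h1]
  · rcases h2 with rfl | rfl | rfl | rfl | rfl <;> simp
  · subst h3; simp
  · subst h4; simp
  · push Not at h1; simp [h1.1, h1.2]

lemma pvRank_four_iff (u : String) :
    pvRank u = 4 ↔ (["queued", "scheduled", "running", "deferred", "none"].contains u = true) := by
  rw [pvRank_eq]; split_ifs with h1 h2 h3 h4
  · rcases h1 with rfl | rfl <;> simp
  · simp [h2]
  · subst h3; simp
  · subst h4; simp
  · push Not at h2; simp [h2.1, h2.2.1, h2.2.2.1, h2.2.2.2.1, h2.2.2.2.2]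

lemma pvRank_two_iff (u : String) : pvRank u = 2 ↔ ((u == "skipped") = true) := by
  rw [pvRank_eq]; split_ifs with h1 h2 h3 h4
  · rcases h1 with rfl | rfl <;> simp
  · rcases h2 with rfl | rfl | rfl | rfl | rfl <;> simp
  · simp [h3]
  · subst h4; simp
  · simp [h3]

lemma pvRank_one_iff (u : String) : pvRank u = 1 ↔ ((u == "success") = true) := by
  rw [pvRank_eq]; split_ifs with h1 h2 h3 h4
  · rcases h1 with rfl | rfl <;> simp
  · rcases h2 with rfl | rfl | rfl | rfl | rfl <;> simp
  · subst h3; simp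
  · simp [h4]
  · simp [h4]

lemma pvRank_le_two_iff (u : String) :
    pvRank u ≤ 2 ↔ (["success", "skipped"].contains u = true) := by
  rw [pvRank_eq]; split_ifs with h1 h2 h3 h4
  · rcases h1 with rfl | rfl <;> simp
  · rcases h2 with rfl | rfl | rfl | rfl | rfl <;> simp
  · subst h3; simp
  · subst h4; simp
  · simp [h3, h4]

lemma pvRank_cases (u : String) :
    pvRank u = 5 ∨ pvRank u = 4 ∨ pvRank u = 3 ∨ pvRank u = 2 ∨ pvRank u = 1 := by
  rw [pvRank_eq]; split_ifs <;> simp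

lemma pvFold_ge_init (vs : List String) (a : Int) :
    a ≤ vs.foldl (fun m u => max m (pvRank u)) a := by
  induction vs generalizing a with
  | nil => simp
  | cons x xs ih => exact le_trans (le_max_left _ _) (ih (max a (pvRank x)))

lemma pvFold_ge_mem : ∀ (vs : List String) (a : Int) (u : String), u ∈ vs →
    pvRank u ≤ vs.foldl (fun m u => max m (pvRank u)) a := by
  intro vs
  induction vs with
  | nil => intro a u hu; cases hu
  | cons x xs ih =>
    intro a u hu
    rcases List.mem_cons.mp hu with rfl | h
    · exact le_trans (le_max_right _ _) (pvFold_ge_init xs _)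
    · exact ih _ _ h

lemma pvFold_attained (vs : List String) (a : Int) :
    vs.foldl (fun m u => max m (pvRank u)) a = a ∨
      ∃ u ∈ vs, vs.foldl (fun m u => max m (pvRank u)) a = pvRank u := by
  induction vs generalizing a with
  | nil => left; rfl
  | cons x xs ih =>
    rcases ih (max a (pvRank x)) with h | ⟨u, hu, h⟩
    · simp only [List.foldl_cons] at *
      rcases max_choice a (pvRank x) with hm | hm
      · left; rw [h, hm]
      · right; exact ⟨x, List.mem_cons_self .., by rw [h, hm]⟩
    · right; exact ⟨u, List.mem_cons_of_mem _ hu, h⟩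

-- the heart of the equivalence: A's staged decision over any list of normalized values
-- equals the table entry at the maximum rank
lemma pvDecide_eq (vs : List String) :
    (if vs.any (fun v => ["failed", "upstream_failed"].contains v) then "failed"
     else if (!vs.isEmpty) && vs.all (fun v => v == "success") then "success"
     else if vs.any (fun v => ["queued", "scheduled", "running", "deferred", "none"].contains v) then "running"
     else if (!vs.isEmpty) && vs.all (fun v => ["success", "skipped"].contains v)
             && vs.any (fun v => v == "skipped") then "skipped"
     else "unknown")
    = (PySem.List.pyGet? pvTABLE (vs.foldl (fun m u => max m (pvRank u)) 0)).getD "" := by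
  rcases pvFold_attained vs 0 with h0 | ⟨u, hu, heq⟩
  · have hnil : vs = [] := by
      cases vs with
      | nil => rfl
      | cons x xs =>
        exfalso
        have h1 := pvFold_ge_mem (x :: xs) 0 x (List.mem_cons_self ..)
        have h2 := (pvRank_bounds x).1
        omega
    subst hnil; rfl
  · have hub : ∀ v ∈ vs, pvRank v ≤ pvRank u := by
      intro v hv; rw [← heq]; exact pvFold_ge_mem vs 0 v hv
    rcases pvRank_cases u with h | h | h | h | h
    · -- max rank 5: some failed/upstream_failed value
      rw [if_pos (List.any_eq_true.mpr ⟨u, hu, (pvRank_five_iff u).mp h⟩), heq, h]; simp [pvTABLE, PySem.List.pyGet?, PySem.List.pyIdx?]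
    · -- max rank 4: no failed, not all success, some running-like value
      have hno5 : vs.any (fun v => ["failed", "upstream_failed"].contains v) = false := by
        rw [List.any_eq_false]; intro v hv hc
        have := (pvRank_five_iff v).mpr hc; have := hub v hv; omega
      have hns : vs.all (fun v => v == "success") = false := by
        rw [List.all_eq_false]; refine ⟨u, hu, fun hc => ?_⟩
        have := (pvRank_one_iff u).mpr hc; omega
      have h4 : vs.any (fun v => ["queued", "scheduled", "running", "deferred", "none"].contains v) = true :=
        List.any_eq_true.mpr ⟨u, hu, (pvRank_four_iff u).mp h⟩
      rw [hno5, hns, h4, heq, h]; simp [pvTABLE, PySem.List.pyGet?, PySem.List.pyIdx?]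
    · -- max rank 3: some unrecognized value, nothing failed/running-like
      have hno5 : vs.any (fun v => ["failed", "upstream_failed"].contains v) = false := by
        rw [List.any_eq_false]; intro v hv hc
        have := (pvRank_five_iff v).mpr hc; have := hub v hv; omega
      have hns : vs.all (fun v => v == "success") = false := by
        rw [List.all_eq_false]; refine ⟨u, hu, fun hc => ?_⟩
        have := (pvRank_one_iff u).mpr hc; omega
      have hno4 : vs.any (fun v => ["queued", "scheduled", "running", "deferred", "none"].contains v) = false := by
        rw [List.any_eq_false]; intro v hv hc
        have := (pvRank_four_iff v).mpr hc; have := hub v hv; omega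
      have hnss : vs.all (fun v => ["success", "skipped"].contains v) = false := by
        rw [List.all_eq_false]; refine ⟨u, hu, fun hc => ?_⟩
        have := (pvRank_le_two_iff u).mpr hc; omega
      rw [hno5, hns, hno4, hnss, heq, h]; simp [pvTABLE, PySem.List.pyGet?, PySem.List.pyIdx?]
    · -- max rank 2: every value success/skipped, at least one skipped
      have hno5 : vs.any (fun v => ["failed", "upstream_failed"].contains v) = false := by
        rw [List.any_eq_false]; intro v hv hc
        have := (pvRank_five_iff v).mpr hc; have := hub v hv; omega
      have hns : vs.all (fun v => v == "success") = false := by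
        rw [List.all_eq_false]; refine ⟨u, hu, fun hc => ?_⟩
        have := (pvRank_one_iff u).mpr hc; omega
      have hno4 : vs.any (fun v => ["queued", "scheduled", "running", "deferred", "none"].contains v) = false := by
        rw [List.any_eq_false]; intro v hv hc
        have := (pvRank_four_iff v).mpr hc; have := hub v hv; omega
      have hss : vs.all (fun v => ["success", "skipped"].contains v) = true := by
        rw [List.all_eq_true]; intro v hv
        refine (pvRank_le_two_iff v).mp ?_
        have := hub v hv; omega
      have hsk : vs.any (fun v => v == "skipped") = true :=
        List.any_eq_true.mpr ⟨u, hu, (pvRank_two_iff u).mp h⟩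
      have hne : vs.isEmpty = false := List.isEmpty_eq_false_iff.mpr (List.ne_nil_of_mem hu)
      rw [hno5, hns, hno4, hss, hsk, hne, heq, h]; simp [pvTABLE, PySem.List.pyGet?, PySem.List.pyIdx?]
    · -- max rank 1: nonempty, every value success
      have hno5 : vs.any (fun v => ["failed", "upstream_failed"].contains v) = false := by
        rw [List.any_eq_false]; intro v hv hc
        have := (pvRank_five_iff v).mpr hc; have := hub v hv; omega
      have hall : vs.all (fun v => v == "success") = true := by
        rw [List.all_eq_true]; intro v hv
        refine (pvRank_one_iff v).mp ?_
        have h1 := hub v hv; have h2 := (pvRank_bounds v).1; omega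
      have hne : vs.isEmpty = false := List.isEmpty_eq_false_iff.mpr (List.ne_nil_of_mem hu)
      rw [hno5, hall, hne, heq, h]; simp [pvTABLE, PySem.List.pyGet?, PySem.List.pyIdx?]

-- ===== VERDICT (by name: the statement is the Claim_ definition above) =====
theorem state_from_task_states_spec : Claim_equal_state_from_task_states := by
  intro task_states _
  unfold Spec_state_from_task_states state_from_task_states state_from_task_states_alt
  refine (pvDecide_eq ((PySem.Dict.ofList task_states).values.map
      (fun v => PySem.Str.lower (PySem.Str.strip v)))).trans ?_
  rw [List.foldl_map]
  rfl
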